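-- pv_equiv track=rewrite | github.com/AlexTuisov/HW3 | HW3_submission/28_submission/hw3.py | find_populations_healthy
-- ===== SOURCE A (Python) =====
-- DIRECTIONS = [(1, 0), (-1, 0), (0, 1), (0, -1)]
--
-- def find_populations_healthy(state_map, n_medics, zoc):
--     res_s = []
--     res_q_s = []
--     n_rows = len(state_map)
--     n_cols = len(state_map[0])
--     for i in range(n_rows):
--         for j in range(n_cols):
--             if state_map[i][j] == 'H':
--                 for dirc in DIRECTIONS:
--                     out = False
--                     i2 = i + dirc[0]
--                     j2 = j + dirc[1]
--                     if 0 <= i2 < n_rows and 0 <= j2 < n_cols: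
--                         if state_map[i2][j2] == 'S':
--                             res_s.append((i, j))
--                             break
--                         elif state_map[i2][j2] == 'Q':
--                             for direc2 in DIRECTIONS:
--                                 i3 = i2 + direc2[0]
--                                 j3 = j2 + direc2[1]
--                                 if 0 <= i3 < n_rows and 0 <= j3 < n_cols and state_map[i3][j3] == 'S':
--                                     res_q_s.append((i, j))
--                                     out = True
--                                     break
--                             if out:
--                                 break
--     if len(res_s) < n_medics:
--         return res_s + res_q_s
--     return res_s
-- ===== SOURCE B (Python) =====
-- DIRECTIONS = [(1, 0), (-1, 0), (0, 1), (0, -1)]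
--
-- def find_populations_healthy(state_map, n_medics, zoc):
--     n_rows = len(state_map)
--     n_cols = len(state_map[0])
--
--     def in_bounds(i, j):
--         return 0 <= i < n_rows and 0 <= j < n_cols
--
--     # pass 1: every 'Q' cell that has an in-bounds 'S' 4-neighbour
--     dangerous_q = {
--         (i, j)
--         for i in range(n_rows)
--         for j in range(n_cols)
--         if state_map[i][j] == 'Q'
--         and any(in_bounds(i + di, j + dj) and state_map[i + di][j + dj] == 'S'
--                 for di, dj in DIRECTIONS)
--     }
--
--     # pass 2: classify each 'H' cell by its first qualifying neighbour
--     res_s = []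
--     res_q_s = []
--     for i in range(n_rows):
--         for j in range(n_cols):
--             if state_map[i][j] != 'H':
--                 continue
--             for di, dj in DIRECTIONS:
--                 i2, j2 = i + di, j + dj
--                 if not in_bounds(i2, j2):
--                     continue
--                 if state_map[i2][j2] == 'S':
--                     res_s.append((i, j))
--                     break
--                 if (i2, j2) in dangerous_q:
--                     res_q_s.append((i, j))
--                     break
--     return res_s + res_q_s if len(res_s) < n_medics else res_s
-- ===== Notes on version B (the rewrite author's own statement) =====
-- stated objective: alternative
-- what changed: B precomputes in a separate first pass the set of dangerous Q cells (Q with an in-bounds S neighbour) and the per-H-cell loop then just tests set membership, instead of A's inline rescan of each Q neighbour's neighbours.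
import Mathlib
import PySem

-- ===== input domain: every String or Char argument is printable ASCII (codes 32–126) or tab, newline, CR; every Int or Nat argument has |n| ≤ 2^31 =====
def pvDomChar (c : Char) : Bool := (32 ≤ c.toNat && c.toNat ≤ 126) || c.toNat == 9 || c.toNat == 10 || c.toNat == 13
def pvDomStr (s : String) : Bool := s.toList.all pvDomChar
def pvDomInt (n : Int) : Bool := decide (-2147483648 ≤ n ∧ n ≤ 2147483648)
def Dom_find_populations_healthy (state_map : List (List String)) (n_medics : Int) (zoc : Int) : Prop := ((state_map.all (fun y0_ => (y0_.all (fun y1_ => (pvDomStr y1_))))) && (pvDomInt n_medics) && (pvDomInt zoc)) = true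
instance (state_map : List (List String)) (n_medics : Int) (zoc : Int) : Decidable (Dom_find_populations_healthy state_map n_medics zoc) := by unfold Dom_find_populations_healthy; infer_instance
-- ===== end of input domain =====

-- B replaces A's inline per-neighbour rescan of Q cells by a precomputed set of
-- dangerous Q cells built in a separate first pass (alternative decomposition, same cost).

-- ===== PORT A =====
def pvDirs : List (Int × Int) := [(1, 0), (-1, 0), (0, 1), (0, -1)]

-- state_map[i][j]; the ports only evaluate it with in-range indices (guarded), so the defaults are never observed inside Pre_
def pvCell (m : List (List String)) (i j : Int) : String :=
  PySem.List.pyGetD (PySem.List.pyGetD m i []) j ""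

-- A's inner 'for direc2 in DIRECTIONS' loop: appends (i,j) to res_q_s and sets out=True on the first S found
def pvAQScan (m : List (List String)) (nr nc i j i2 j2 : Int) :
    List (Int × Int) → List (Int × Int) → (List (Int × Int) × Bool)
  | [], q => (q, false)
  | d :: ds, q =>
    let i3 := i2 + d.1
    let j3 := j2 + d.2
    if 0 ≤ i3 ∧ i3 < nr ∧ 0 ≤ j3 ∧ j3 < nc ∧ pvCell m i3 j3 = "S" then
      (q ++ [(i, j)], true)
    else pvAQScan m nr nc i j i2 j2 ds q

-- A's 'for dirc in DIRECTIONS' loop over one H cell, threading (res_s, res_q_s)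
def pvADirLoop (m : List (List String)) (nr nc i j : Int) :
    List (Int × Int) → List (Int × Int) → List (Int × Int) →
    (List (Int × Int) × List (Int × Int))
  | [], s, q => (s, q)
  | d :: ds, s, q =>
    let i2 := i + d.1
    let j2 := j + d.2
    if 0 ≤ i2 ∧ i2 < nr ∧ 0 ≤ j2 ∧ j2 < nc then
      if pvCell m i2 j2 = "S" then (s ++ [(i, j)], q)
      else if pvCell m i2 j2 = "Q" then
        let r := pvAQScan m nr nc i j i2 j2 pvDirs q
        if r.2 then (s, r.1) else pvADirLoop m nr nc i j ds s r.1
      else pvADirLoop m nr nc i j ds s q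
    else pvADirLoop m nr nc i j ds s q

def find_populations_healthy (state_map : List (List String)) (n_medics : Int) (zoc : Int) : List (Int × Int) :=
  let nr : Int := state_map.length
  let nc : Int := (state_map.headD []).length
  let p := (PySem.List.pyRange 0 nr 1).foldl (fun acc i =>
      (PySem.List.pyRange 0 nc 1).foldl (fun acc j =>
        if pvCell state_map i j = "H" then
          pvADirLoop state_map nr nc i j pvDirs acc.1 acc.2
        else acc) acc) ([], [])
  if (p.1.length : Int) < n_medics then p.1 ++ p.2 else p.1

-- ===== PORT B =====
def pvInB (nr nc i j : Int) : Bool := decide (0 ≤ i ∧ i < nr ∧ 0 ≤ j ∧ j < nc)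

-- any(in_bounds(i+di, j+dj) and state_map[i+di][j+dj] == 'S' for di, dj in DIRECTIONS)
def pvHasS (m : List (List String)) (nr nc i j : Int) : Bool :=
  pvDirs.any (fun d => pvInB nr nc (i + d.1) (j + d.2) && decide (pvCell m (i + d.1) (j + d.2) = "S"))

-- pass 1: the set comprehension building dangerous_q
def pvDanger (m : List (List String)) (nr nc : Int) : PySem.Set (Int × Int) :=
  (PySem.List.pyRange 0 nr 1).foldl (fun s i =>
    (PySem.List.pyRange 0 nc 1).foldl (fun s j =>
      if (pvCell m i j == "Q") && pvHasS m nr nc i j then PySem.Set.add s (i, j) else s) s)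
    PySem.Set.empty

-- pass 2's per-H-cell direction loop: first S neighbour → res_s, else first dangerous-Q neighbour → res_q_s
def pvBDirLoop (dq : PySem.Set (Int × Int)) (m : List (List String)) (nr nc i j : Int) :
    List (Int × Int) → List (Int × Int) → List (Int × Int) →
    (List (Int × Int) × List (Int × Int))
  | [], s, q => (s, q)
  | d :: ds, s, q =>
    let i2 := i + d.1
    let j2 := j + d.2
    if ¬ pvInB nr nc i2 j2 then pvBDirLoop dq m nr nc i j ds s q
    else if pvCell m i2 j2 = "S" then (s ++ [(i, j)], q)
    else if PySem.Set.contains dq (i2, j2) then (s, q ++ [(i, j)])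
    else pvBDirLoop dq m nr nc i j ds s q

def find_populations_healthy_alt (state_map : List (List String)) (n_medics : Int) (zoc : Int) : List (Int × Int) :=
  let nr : Int := state_map.length
  let nc : Int := (state_map.headD []).length
  let dq := pvDanger state_map nr nc
  let p := (PySem.List.pyRange 0 nr 1).foldl (fun acc i =>
      (PySem.List.pyRange 0 nc 1).foldl (fun acc j =>
        if ¬ (pvCell state_map i j = "H") then acc
        else pvBDirLoop dq state_map nr nc i j pvDirs acc.1 acc.2) acc) ([], [])
  if (p.1.length : Int) < n_medics then p.1 ++ p.2 else p.1

-- ===== PRECONDITION & SPEC =====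
-- Pre_ excludes exactly the inputs where the Python A raises IndexError: the empty grid
-- (len(state_map[0])) and grids where some row is shorter than row 0 (read at j < n_cols).
def Pre_find_populations_healthy (state_map : List (List String)) (n_medics : Int) (zoc : Int) : Prop :=
  state_map ≠ [] ∧ ∀ row ∈ state_map, (state_map.headD []).length ≤ row.length
instance (state_map : List (List String)) (n_medics : Int) (zoc : Int) : Decidable (Pre_find_populations_healthy state_map n_medics zoc) := by unfold Pre_find_populations_healthy; infer_instance

def pvWitness_find_populations_healthy : List (List String) × Int × Int :=
  ([["H", "S"], ["Q", "H"]], 1, 0)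

def Spec_find_populations_healthy (state_map : List (List String)) (n_medics : Int) (zoc : Int) (out : List (Int × Int)) : Prop := out = find_populations_healthy_alt state_map n_medics zoc
instance (state_map : List (List String)) (n_medics : Int) (zoc : Int) (out : List (Int × Int)) : Decidable (Spec_find_populations_healthy state_map n_medics zoc out) := by unfold Spec_find_populations_healthy; infer_instance

-- ===== CLAIM (what is proved, stated in full; the proofs are below) =====
def Claim_equal_find_populations_healthy : Prop := ∀ (state_map : List (List String)) (n_medics : Int) (zoc : Int), Dom_find_populations_healthy state_map n_medics zoc → Pre_find_populations_healthy state_map n_medics zoc → Spec_find_populations_healthy state_map n_medics zoc (find_populations_healthy state_map n_medics zoc)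

-- ===== LEMMAS AND PROOFS =====

-- membership in a set built by a conditional foldl-add
lemma pv_mem_foldl_add {α β : Type} [BEq β] [LawfulBEq β] (c : α → Bool) (f : α → β) :
    ∀ (L : List α) (s : PySem.Set β) (x : β),
      (x ∈ L.foldl (fun s a => if c a then PySem.Set.add s (f a) else s) s) ↔
        (x ∈ s ∨ ∃ a ∈ L, c a = true ∧ f a = x) := by
  intro L
  induction L with
  | nil => simp
  | cons a L ih =>
    intro s x
    simp only [List.foldl_cons, ih, List.mem_cons]
    by_cases h : c a = true
    · simp [h, PySem.Set.mem_add]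
      all_goals tauto
    · simp [h]
      all_goals tauto

lemma pv_mem_danger (m : List (List String)) (nr nc : Int) (a b : Int) :
    ((a, b) ∈ pvDanger m nr nc) ↔
      (0 ≤ a ∧ a < nr ∧ 0 ≤ b ∧ b < nc ∧ pvCell m a b = "Q" ∧ pvHasS m nr nc a b = true) := by
  unfold pvDanger
  have hout :
      ∀ (Li : List Int) (s : PySem.Set (Int × Int)) (x : Int × Int),
        (x ∈ Li.foldl (fun s i =>
            (PySem.List.pyRange 0 nc 1).foldl (fun s j =>
              if (pvCell m i j == "Q") && pvHasS m nr nc i j then PySem.Set.add s (i, j) else s) s) s) ↔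
          (x ∈ s ∨ ∃ i ∈ Li, ∃ j ∈ PySem.List.pyRange 0 nc 1,
              ((pvCell m i j == "Q") && pvHasS m nr nc i j) = true ∧ (i, j) = x) := by
    intro Li
    induction Li with
    | nil => simp
    | cons i Li ih =>
      intro s x
      simp only [List.foldl_cons, ih, List.mem_cons,
        pv_mem_foldl_add (fun j => (pvCell m i j == "Q") && pvHasS m nr nc i j) (fun j => (i, j))]
      constructor
      · rintro ((hx | ⟨j, hj, hc, hx⟩) | ⟨i', hi', j, hj, hc, hx⟩)
        · exact Or.inl hx
        · exact Or.inr ⟨i, Or.inl rfl, j, hj, hc, hx⟩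
        · exact Or.inr ⟨i', Or.inr hi', j, hj, hc, hx⟩
      · rintro (hx | ⟨i', hi' | hi', j, hj, hc, hx⟩)
        · exact Or.inl (Or.inl hx)
        · exact Or.inl (Or.inr ⟨j, hj, by rw [← hi']; exact hc, by rw [← hi']; exact hx⟩)
        · exact Or.inr ⟨i', hi', j, hj, hc, hx⟩
  rw [hout]
  simp only [PySem.Set.empty, List.not_mem_nil, false_or, PySem.List.mem_pyRange_one]
  constructor
  · rintro ⟨i, hi, j, hj, hc, hx⟩
    obtain ⟨rfl, rfl⟩ : i = a ∧ j = b := by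
      simpa [Prod.ext_iff] using hx
    simp only [Bool.and_eq_true, beq_iff_eq] at hc
    exact ⟨hi.1, hi.2, hj.1, hj.2, hc.1, hc.2⟩
  · rintro ⟨h1, h2, h3, h4, h5, h6⟩
    exact ⟨a, ⟨h1, h2⟩, b, ⟨h3, h4⟩, by simp [h5, h6], rfl⟩

-- A's inner Q scan computes (q ++ [(i,j)] if some direction sees an S else q, that same flag)
lemma pv_aqscan_eq (m : List (List String)) (nr nc i j i2 j2 : Int) :
    ∀ (ds : List (Int × Int)) (q : List (Int × Int)),
      pvAQScan m nr nc i j i2 j2 ds q =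
        (if ds.any (fun d => pvInB nr nc (i2 + d.1) (j2 + d.2) &&
              decide (pvCell m (i2 + d.1) (j2 + d.2) = "S")) then q ++ [(i, j)] else q,
         ds.any (fun d => pvInB nr nc (i2 + d.1) (j2 + d.2) &&
              decide (pvCell m (i2 + d.1) (j2 + d.2) = "S"))) := by
  intro ds
  induction ds with
  | nil => intro q; simp [pvAQScan]
  | cons d ds ih =>
    intro q
    rw [List.any_cons]
    by_cases h : 0 ≤ i2 + d.1 ∧ i2 + d.1 < nr ∧ 0 ≤ j2 + d.2 ∧ j2 + d.2 < nc ∧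
        pvCell m (i2 + d.1) (j2 + d.2) = "S"
    · have hd : (pvInB nr nc (i2 + d.1) (j2 + d.2) &&
          decide (pvCell m (i2 + d.1) (j2 + d.2) = "S")) = true := by
        simp only [pvInB, Bool.and_eq_true, decide_eq_true_eq]; tauto
      rw [hd]
      simp only [pvAQScan, Bool.true_or, if_true, if_pos h]
    · have hd : (pvInB nr nc (i2 + d.1) (j2 + d.2) &&
          decide (pvCell m (i2 + d.1) (j2 + d.2) = "S")) = false := by
        rw [Bool.eq_false_iff]
        simp only [pvInB, ne_eq, Bool.and_eq_true, decide_eq_true_eq, not_and]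
        tauto
      rw [hd]
      simp only [pvAQScan, Bool.false_or, if_neg h, ih]

-- specialisation to the full direction list, phrased through pvHasS
lemma pv_aqscan_pvDirs (m : List (List String)) (nr nc i j i2 j2 : Int) (q : List (Int × Int)) :
    pvAQScan m nr nc i j i2 j2 pvDirs q =
      (if pvHasS m nr nc i2 j2 then q ++ [(i, j)] else q, pvHasS m nr nc i2 j2) := by
  rw [pv_aqscan_eq]
  rfl

-- the two per-H-cell direction loops agree
lemma pv_dirloop_eq (m : List (List String)) (nr nc i j : Int) :
    ∀ (ds : List (Int × Int)) (s q : List (Int × Int)),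
      pvADirLoop m nr nc i j ds s q = pvBDirLoop (pvDanger m nr nc) m nr nc i j ds s q := by
  intro ds
  induction ds with
  | nil => intro s q; rfl
  | cons d ds ih =>
    intro s q
    simp only [pvADirLoop, pvBDirLoop]
    by_cases hb : 0 ≤ i + d.1 ∧ i + d.1 < nr ∧ 0 ≤ j + d.2 ∧ j + d.2 < nc
    · have hbB : pvInB nr nc (i + d.1) (j + d.2) = true := by
        simp only [pvInB, decide_eq_true_eq]; exact hb
      rw [if_pos hb, if_neg (not_not_intro hbB)]
      by_cases hS : pvCell m (i + d.1) (j + d.2) = "S"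
      · rw [if_pos hS, if_pos hS]
      · rw [if_neg hS, if_neg hS]
        by_cases hQ : pvCell m (i + d.1) (j + d.2) = "Q"
        · rw [if_pos hQ, pv_aqscan_pvDirs]
          have hcont : PySem.Set.contains (pvDanger m nr nc) (i + d.1, j + d.2) =
              pvHasS m nr nc (i + d.1) (j + d.2) := by
            by_cases hH : pvHasS m nr nc (i + d.1) (j + d.2) = true
            · rw [hH, PySem.Set.contains_iff, pv_mem_danger]
              exact ⟨hb.1, hb.2.1, hb.2.2.1, hb.2.2.2, hQ, hH⟩
            · rw [Bool.eq_false_iff.mpr hH, ← Bool.not_eq_true,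
                PySem.Set.contains_iff, pv_mem_danger]
              intro hmem
              exact hH hmem.2.2.2.2.2
          by_cases hH : pvHasS m nr nc (i + d.1) (j + d.2) = true
          · simp only [hH, hcont, if_true]
          · have hH' : pvHasS m nr nc (i + d.1) (j + d.2) = false := Bool.eq_false_iff.mpr hH
            simp only [hH', hcont, Bool.false_eq_true, if_false]
            exact ih s q
        · have hcont : PySem.Set.contains (pvDanger m nr nc) (i + d.1, j + d.2) = false := by
            rw [← Bool.not_eq_true, PySem.Set.contains_iff, pv_mem_danger]
            intro hmem
            exact hQ hmem.2.2.2.2.1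
          rw [if_neg hQ, hcont]
          simp only [Bool.false_eq_true, if_false]
          exact ih s q
    · have hbB : pvInB nr nc (i + d.1) (j + d.2) = false := by
        rw [Bool.eq_false_iff]
        simp only [pvInB, ne_eq, decide_eq_true_eq]
        exact hb
      rw [if_neg hb, if_pos (by rw [hbB]; exact Bool.false_ne_true)]
      exact ih s q

-- ===== VERDICT (by name: the statement is the Claim_ definition above) =====
theorem find_populations_healthy_spec : Claim_equal_find_populations_healthy := by
  intro state_map n_medics zoc _ _
  unfold Spec_find_populations_healthy find_populations_healthy find_populations_healthy_alt
  have hstep :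
      (fun (acc : List (Int × Int) × List (Int × Int)) (i : Int) =>
        (PySem.List.pyRange 0 ((state_map.headD []).length : Int) 1).foldl (fun acc j =>
          if pvCell state_map i j = "H" then
            pvADirLoop state_map (state_map.length : Int) ((state_map.headD []).length : Int) i j pvDirs acc.1 acc.2
          else acc) acc) =
      (fun (acc : List (Int × Int) × List (Int × Int)) (i : Int) =>
        (PySem.List.pyRange 0 ((state_map.headD []).length : Int) 1).foldl (fun acc j =>
          if ¬ (pvCell state_map i j = "H") then acc
          else pvBDirLoop (pvDanger state_map (state_map.length : Int) ((state_map.headD []).length : Int))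
            state_map (state_map.length : Int) ((state_map.headD []).length : Int) i j pvDirs acc.1 acc.2) acc) := by
    funext acc i
    congr 1
    funext acc j
    by_cases h : pvCell state_map i j = "H"
    · simp [h, pv_dirloop_eq]
    · simp [h]
  simp only [hstep]
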